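-- pv_equiv track=rewrite | github.com/XC0R/ArkLib | scripts/kb/common.py | parse_quoted_value
-- ===== SOURCE A (Python) =====
-- def parse_quoted_value(text: str, start: int) -> tuple[str, int]:
--     """Parse a quote-delimited BibTeX value."""
--
--     i = start + 1
--     chunk_start = i
--     while i < len(text):
--         if text[i] == '"' and text[i - 1] != "\\":
--             return text[chunk_start:i], i + 1
--         i += 1
--     return text[start + 1 :].strip(), len(text)
-- ===== SOURCE B (Python) =====
-- def parse_quoted_value(text: str, start: int) -> tuple[str, int]:
--     """Parse a quote-delimited BibTeX value by splitting the tail on '"'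
--     and gluing chunks back together while each quote is escaped."""
--     tail = text[start + 1:]
--     parts = tail.split('"')
--     value = parts[0]
--     for part in parts[1:]:
--         prev = value[-1] if value else text[start]
--         if prev != "\\":
--             return value, start + 1 + len(value) + 1
--         value = value + '"' + part
--     return tail.strip(), len(text)
-- ===== Notes on version B (the rewrite author's own statement) =====
-- stated objective: faster
-- what changed: Replaced A's per-character index scan with a two-stage split-and-rejoin: the tail after the opening quote is split on '"' once, then a fold over the chunks glues escaped quotes back together and stops at the first chunk boundary whose preceding character is not a backslash.
-- outside the precondition, e.g. on parse_quoted_value('a"a', -2): A returns ('', 2), B returns ('a', 3)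
import Mathlib
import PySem

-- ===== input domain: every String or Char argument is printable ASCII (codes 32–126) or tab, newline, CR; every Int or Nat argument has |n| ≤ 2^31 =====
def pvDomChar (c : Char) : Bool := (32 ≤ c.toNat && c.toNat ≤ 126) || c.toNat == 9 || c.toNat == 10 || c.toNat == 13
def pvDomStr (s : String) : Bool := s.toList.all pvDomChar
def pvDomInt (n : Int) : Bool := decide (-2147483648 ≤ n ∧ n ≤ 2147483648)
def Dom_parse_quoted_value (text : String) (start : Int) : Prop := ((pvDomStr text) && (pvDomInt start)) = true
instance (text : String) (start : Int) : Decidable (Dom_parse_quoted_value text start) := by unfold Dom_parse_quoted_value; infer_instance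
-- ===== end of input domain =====

-- B replaces A's per-character scan by one split on '"' plus a fold gluing escaped quotes back (constant-factor faster: the scan happens inside str.split); return values proved equal for start ≥ 0.


-- ===== PORT A =====
-- A's while-loop: fuel = number of remaining iterations (len(text) - i); `some` is A's
-- early return, `none` means the loop ran off the end (the caller then does A's fallback).
-- PySem.Str.pyGet? returning none is Python's IndexError (reachable only for start < -1,
-- outside Pre_); the loop then falls through to the fallback arbitrarily.
def pqvScanA (text : String) (chunkStart : Int) : Int → Nat → Option (String × Int)
  | _, 0 => none
  | i, fuel + 1 =>
    match PySem.Str.pyGet? text i with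
    | none => none
    | some c =>
      if c = '"' then
        match PySem.Str.pyGet? text (i - 1) with
        | none => none
        | some p =>
          if p ≠ '\\' then some (PySem.Str.slice text (some chunkStart) (some i), i + 1)
          else pqvScanA text chunkStart (i + 1) fuel
      else pqvScanA text chunkStart (i + 1) fuel

def parse_quoted_value (text : String) (start : Int) : String × Int :=
  (pqvScanA text (start + 1) (start + 1) (PySem.Str.len text - (start + 1)).toNat).getD
    (PySem.Str.strip (PySem.Str.slice text (some (start + 1)) none), PySem.Str.len text)

-- ===== PORT B =====
-- B's for-loop over parts[1:], accumulating `value`; the [] case is Python's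
-- fall-through to `return tail.strip(), len(text)`.
def pqvGlueB (text : String) (start : Int) (tailStr : String) : String → List String → String × Int
  | _, [] => (PySem.Str.strip tailStr, PySem.Str.len text)
  | value, part :: rest =>
    let prev : Option Char :=
      if PySem.Str.len value ≠ 0 then PySem.Str.pyGet? value (-1)
      else PySem.Str.pyGet? text start   -- text[start]; none = IndexError, unreachable under Pre_
    if prev ≠ some '\\' then (value, start + 1 + PySem.Str.len value + 1)
    else pqvGlueB text start tailStr (value ++ "\"" ++ part) rest

def parse_quoted_value_alt (text : String) (start : Int) : String × Int :=
  let tailStr := PySem.Str.slice text (some (start + 1)) none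
  match PySem.Str.split? tailStr "\"" with
  | some (value :: rest) => pqvGlueB text start tailStr value rest
  | _ => (PySem.Str.strip tailStr, PySem.Str.len text)  -- unreachable: split? on a nonempty sep is some nonempty

-- ===== PRECONDITION & SPEC =====
-- start is meant to be the index of the opening quote; Pre_ keeps to that natural domain,
-- excluding negative start, where A's behaviour is an accident of Python negative-index
-- wraparound (and where A raises IndexError whenever start + 1 < -len(text) on nonempty text).
def Pre_parse_quoted_value (text : String) (start : Int) : Prop := 0 ≤ start
instance (text : String) (start : Int) : Decidable (Pre_parse_quoted_value text start) := by
  unfold Pre_parse_quoted_value; infer_instance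

def pvWitness_parse_quoted_value : String × Int := ("\"hi\"", 0)

def Spec_parse_quoted_value (text : String) (start : Int) (out : String × Int) : Prop := out = parse_quoted_value_alt text start
instance (text : String) (start : Int) (out : String × Int) : Decidable (Spec_parse_quoted_value text start out) := by unfold Spec_parse_quoted_value; infer_instance

-- ===== CLAIM (what is proved, stated in full; the proofs are below) =====
def Claim_equal_parse_quoted_value : Prop := ∀ (text : String) (start : Int), Dom_parse_quoted_value text start → Pre_parse_quoted_value text start → Spec_parse_quoted_value text start (parse_quoted_value text start)

-- ===== LEMMAS AND PROOFS =====

-- A's fallback value (the Python `return text[start+1:].strip(), len(text)`).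
def pqvFallback (text : String) (start : Int) : String × Int :=
  (PySem.Str.strip (PySem.Str.slice text (some (start + 1)) none), PySem.Str.len text)

-- structural recursion computing (first piece, later pieces) of cs.split('"')
def pqvSplitChar : List Char → List Char × List (List Char)
  | [] => ([], [])
  | c :: rest =>
    let vp := pqvSplitChar rest
    if c = '"' then ([], vp.1 :: vp.2) else (c :: vp.1, vp.2)

lemma pqvSplitChar_join (cs : List Char) :
    cs = (pqvSplitChar cs).1 ++ (pqvSplitChar cs).2.flatMap (fun p => '"' :: p) := by
  induction cs with
  | nil => rfl
  | cons c rest ih =>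
    simp only [pqvSplitChar]
    by_cases hc : c = '"'
    · simp [hc]; exact ih
    · simpa [hc] using ih

lemma pqvSplitChar_noquote (cs : List Char) :
    '"' ∉ (pqvSplitChar cs).1 ∧ ∀ p ∈ (pqvSplitChar cs).2, '"' ∉ p := by
  induction cs with
  | nil => simp [pqvSplitChar]
  | cons c rest ih =>
    simp only [pqvSplitChar]
    by_cases hc : c = '"'
    · simp only [hc, if_pos rfl]
      refine ⟨by simp, ?_⟩
      intro p hp
      rcases List.mem_cons.mp hp with h | h
      · exact h ▸ ih.1
      · exact ih.2 p h
    · simp only [if_neg hc]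
      refine ⟨?_, ih.2⟩
      simp only [List.mem_cons, not_or]
      exact ⟨fun h => hc h.symm, ih.1⟩

lemma pqv_go_eq : ∀ (fuel : Nat) (l cur : List Char) (acc : List (List Char)),
    l.length < fuel →
    PySem.Chars.splitOn.go ['"'] fuel l cur acc
      = acc.reverse ++ (cur.reverse ++ (pqvSplitChar l).1) :: (pqvSplitChar l).2 := by
  intro fuel
  induction fuel with
  | zero => intro l cur acc h; omega
  | succ fuel ih =>
    intro l cur acc h
    match l with
    | [] =>
      rw [PySem.Chars.splitOn.go]
      simp [pqvSplitChar]
      omega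
    | c :: rest =>
      rw [PySem.Chars.splitOn.go]
      by_cases hc : c = '"'
      · subst hc
        have hpre : List.isPrefixOf ['"'] ('"' :: rest) = true := by
          simp [List.isPrefixOf]
        rw [if_pos hpre]
        simp only [List.length_singleton, List.drop_succ_cons, List.drop_zero]
        rw [ih rest [] (cur.reverse :: acc) (by simpa using h)]
        simp [pqvSplitChar]
      · have hpre : List.isPrefixOf ['"'] (c :: rest) = false := by
          simp [List.isPrefixOf, Ne.symm hc]
        rw [if_neg (by simp [hpre])]
        rw [ih rest (c :: cur) acc (by simpa using h)]
        simp [pqvSplitChar, hc]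

lemma pqv_splitOn_eq (cs : List Char) :
    PySem.Chars.splitOn cs ['"'] = (pqvSplitChar cs).1 :: (pqvSplitChar cs).2 := by
  show PySem.Chars.splitOn.go ['"'] (cs.length + 1) cs [] [] = _
  rw [pqv_go_eq (cs.length + 1) cs [] [] (by omega)]
  simp

lemma pqv_ofList_append (v p : List Char) :
    String.ofList v ++ "\"" ++ String.ofList p = String.ofList (v ++ '"' :: p) := by
  apply String.toList_inj.mp
  simp

-- str.find-free skip: A's scan passes over n quote-free characters unchanged.
lemma pqv_skip (text : String) (cs : Int) (n : Nat) :
    ∀ (i f : Nat), i + n ≤ text.toList.length →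
      (∀ j : Nat, i ≤ j → j < i + n → text.toList[j]? ≠ some '"') →
      pqvScanA text cs (i : Int) (n + f) = pqvScanA text cs ((i : Int) + (n : Int)) f := by
  induction n with
  | zero => intro i f _ _; simp
  | succ n ih =>
    intro i f hle hnq
    have hi : i < text.toList.length := by omega
    have hgi : PySem.Str.pyGet? text (i : Int) = some (text.toList[i]) := by
      rw [PySem.Str.pyGet?_natCast]; exact List.getElem?_eq_getElem hi
    have hne : text.toList[i] ≠ '"' := by
      intro hc
      exact hnq i le_rfl (by omega) (by rw [List.getElem?_eq_getElem hi, hc])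
    have h1 : n + 1 + f = (n + f) + 1 := by omega
    rw [h1]
    show (match PySem.Str.pyGet? text (i : Int) with
      | none => none
      | some c =>
        if c = '"' then
          match PySem.Str.pyGet? text ((i : Int) - 1) with
          | none => none
          | some p =>
            if p ≠ '\\' then some (PySem.Str.slice text (some cs) (some (i : Int)), (i : Int) + 1)
            else pqvScanA text cs ((i : Int) + 1) (n + f)
        else pqvScanA text cs ((i : Int) + 1) (n + f)) = _
    rw [hgi]
    simp only [if_neg hne]
    have hcast : (i : Int) + 1 = ((i + 1 : Nat) : Int) := by push_cast; ring
    rw [hcast, ih (i + 1) f (by omega) (fun j hj1 hj2 => hnq j (by omega) (by omega))]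
    congr 1
    push_cast; ring

-- characters of a quote-free segment of text, located through the drop decomposition
lemma pqv_noquote_seg (L pre seg suf : List Char) (n : Nat)
    (hL : L.drop n = pre ++ (seg ++ suf)) (hseg : '"' ∉ seg) :
    ∀ j : Nat, n + pre.length ≤ j → j < n + pre.length + seg.length → L[j]? ≠ some '"' := by
  intro j hj1 hj2 hget
  have h1 : L[j]? = (pre ++ (seg ++ suf))[j - n]? := by
    rw [← hL, List.getElem?_drop]
    congr 1
    omega
  have h2 : (pre ++ (seg ++ suf))[j - n]? = (seg ++ suf)[j - n - pre.length]? :=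
    List.getElem?_append_right (by omega)
  have h3 : (seg ++ suf)[j - n - pre.length]? = seg[j - n - pre.length]? :=
    List.getElem?_append_left (by omega)
  rw [h1, h2, h3] at hget
  exact hseg (List.mem_of_getElem? hget)

-- the glue invariant: A's scan, resumed at the end of the already-glued `value`,
-- computes exactly B's fold over the remaining '"'-separated pieces.
lemma pqv_glue_main (text : String) (start : Int) (h0 : 0 ≤ start) :
    ∀ (ps : List (List Char)) (value : List Char),
      text.toList.drop (start + 1).toNat = value ++ ps.flatMap (fun p => '"' :: p) →
      (∀ p ∈ ps, '"' ∉ p) →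
      (pqvScanA text (start + 1) (((start + 1).toNat + value.length : Nat) : Int)
          ((PySem.Str.len text) - (((start + 1).toNat + value.length : Nat) : Int)).toNat).getD
        (pqvFallback text start)
      = pqvGlueB text start (PySem.Str.slice text (some (start + 1)) none)
          (String.ofList value) (ps.map String.ofList) := by
  intro ps
  induction ps with
  | nil =>
    intro value hL _
    have hlen : value.length = text.toList.length - (start + 1).toNat := by
      have := congrArg List.length hL
      simpa using this.symm
    have hf0 : ((PySem.Str.len text)
        - (((start + 1).toNat + value.length : Nat) : Int)).toNat = 0 := by
      rw [PySem.Str.len_eq]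
      omega
    rw [hf0]
    simp [pqvScanA, pqvGlueB, pqvFallback]
  | cons part rest ih =>
    intro value hL hnq
    have hL' : text.toList.drop (start + 1).toNat
        = value ++ ('"' :: (part ++ rest.flatMap (fun p => '"' :: p))) := by
      simpa using hL
    have hlen := congrArg List.length hL'
    simp only [List.length_drop, List.length_append, List.length_cons] at hlen
    have hs1 : (start + 1).toNat ≤ text.toList.length := by omega
    have hqlt : (start + 1).toNat + value.length < text.toList.length := by omega
    -- the quote at position qn := (start+1).toNat + value.length
    have hq : text.toList[(start + 1).toNat + value.length]? = some '"' := by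
      have h1 : text.toList[(start + 1).toNat + value.length]?
          = (value ++ ('"' :: (part ++ rest.flatMap (fun p => '"' :: p))))[value.length]? := by
        rw [← hL', List.getElem?_drop]
      rw [h1, List.getElem?_append_right (by omega)]
      simp
    have hq1 : 1 ≤ (start + 1).toNat + value.length := by omega
    obtain ⟨pc, hpcdef⟩ : ∃ c, text.toList[(start + 1).toNat + value.length - 1]? = some c :=
      ⟨_, List.getElem?_eq_getElem (by omega)⟩
    have hprevA : PySem.Str.pyGet? text ((((start + 1).toNat + value.length : Nat) : Int) - 1) = some pc := by
      rw [show (((start + 1).toNat + value.length : Nat) : Int) - 1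
            = (((start + 1).toNat + value.length - 1 : Nat) : Int) by omega,
        PySem.Str.pyGet?_natCast]
      exact hpcdef
    -- B's prev is the same character
    have hprevB : (if PySem.Str.len (String.ofList value) ≠ 0
          then PySem.Str.pyGet? (String.ofList value) (-1)
          else PySem.Str.pyGet? text start) = some pc := by
      rcases List.eq_nil_or_concat value with hv | ⟨v0, c0, hv⟩
      · -- value empty: prev is text[start]
        subst hv
        rw [if_neg (by simp [PySem.Str.len_eq])]
        rw [show start = (((start + 1).toNat - 1 : Nat) : Int) by omega, PySem.Str.pyGet?_natCast]
        rw [show (start + 1).toNat - 1 = (start + 1).toNat + List.length ([] : List Char) - 1 by simp]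
        exact hpcdef
      · -- value nonempty: prev is its last character
        have hvne : value ≠ [] := by simp [hv]
        have hvl : 1 ≤ value.length := List.length_pos_iff.mpr hvne
        rw [if_pos (by simp [PySem.Str.len_eq, hvne])]
        have hlast : PySem.Str.pyGet? (String.ofList value) (-1) = value.getLast? := by
          show PySem.Chars.pyGet? (String.ofList value).toList (-1) = _
          rw [String.toList_ofList]
          simp [PySem.Chars.pyGet?_eq_listPyGet?, PySem.List.pyGet?_neg_one]
        rw [hlast]
        have h2 : text.toList[(start + 1).toNat + value.length - 1]?
            = (value ++ ('"' :: (part ++ rest.flatMap (fun p => '"' :: p))))[value.length - 1]? := by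
          rw [← hL', List.getElem?_drop]
          congr 1
          omega
        rw [List.getElem?_append_left (by omega)] at h2
        rw [hpcdef] at h2
        rw [List.getLast?_eq_getElem?]
        exact h2.symm
    -- unfold one step of A's scan at qn
    have hfuel : ((PySem.Str.len text) - (((start + 1).toNat + value.length : Nat) : Int)).toNat
        = (text.toList.length - ((start + 1).toNat + value.length) - 1) + 1 := by
      rw [PySem.Str.len_eq]
      omega
    rw [hfuel]
    have hgq : PySem.Str.pyGet? text (((start + 1).toNat + value.length : Nat) : Int) = some '"' := by
      rw [PySem.Str.pyGet?_natCast]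
      exact hq
    show (match PySem.Str.pyGet? text (((start + 1).toNat + value.length : Nat) : Int) with
      | none => none
      | some c =>
        if c = '"' then
          match PySem.Str.pyGet? text ((((start + 1).toNat + value.length : Nat) : Int) - 1) with
          | none => none
          | some p =>
            if p ≠ '\\' then
              some (PySem.Str.slice text (some (start + 1)) (some (((start + 1).toNat + value.length : Nat) : Int)),
                (((start + 1).toNat + value.length : Nat) : Int) + 1)
            else pqvScanA text (start + 1) ((((start + 1).toNat + value.length : Nat) : Int) + 1)
              (text.toList.length - ((start + 1).toNat + value.length) - 1)
          else pqvScanA text (start + 1) ((((start + 1).toNat + value.length : Nat) : Int) + 1)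
            (text.toList.length - ((start + 1).toNat + value.length) - 1)).getD
        (pqvFallback text start) = _
    rw [hgq]
    simp only [hprevA]
    -- unfold one step of B's glue
    show _ = (if (if PySem.Str.len (String.ofList value) ≠ 0
          then PySem.Str.pyGet? (String.ofList value) (-1)
          else PySem.Str.pyGet? text start) ≠ some '\\' then
        (String.ofList value, start + 1 + PySem.Str.len (String.ofList value) + 1)
      else pqvGlueB text start (PySem.Str.slice text (some (start + 1)) none)
        (String.ofList value ++ "\"" ++ String.ofList part) (rest.map String.ofList))
    rw [hprevB]
    have hL2 : text.toList.drop (start + 1).toNat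
        = (value ++ ['"']) ++ (part ++ rest.flatMap (fun p => '"' :: p)) := by
      rw [hL']
      simp
    by_cases hbs : pc = '\\'
    · -- escaped quote: both continue
      rw [if_neg (show ¬ pc ≠ '\\' by simp [hbs]), if_neg (show ¬ some pc ≠ some '\\' by simp [hbs])]
      simp only [Option.getD]
      -- A skips the quote-free `part`
      have hskip := pqv_skip text (start + 1) part.length ((start + 1).toNat + value.length + 1)
        (text.toList.length - ((start + 1).toNat + value.length + 1 + part.length))
        (by omega)
        (fun j hj1 hj2 =>
          pqv_noquote_seg text.toList (value ++ ['"']) part (rest.flatMap (fun p => '"' :: p))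
            (start + 1).toNat hL2 (hnq part List.mem_cons_self) j
            (by simp only [List.length_append, List.length_cons, List.length_nil]; omega)
            (by simp only [List.length_append, List.length_cons, List.length_nil]; omega))
      rw [show ((((start + 1).toNat + value.length : Nat) : Int) + 1)
            = (((start + 1).toNat + value.length + 1 : Nat) : Int) by push_cast; ring,
        show text.toList.length - ((start + 1).toNat + value.length) - 1
            = part.length + (text.toList.length - ((start + 1).toNat + value.length + 1 + part.length)) by omega,
        hskip]
      -- apply the induction hypothesis with the glued value
      have hIH := ih (value ++ '"' :: part)
        (by rw [hL']; simp)
        (fun p hp => hnq p (List.mem_cons_of_mem _ hp))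
      rw [show (((start + 1).toNat + value.length + 1 : Nat) : Int) + (part.length : Int)
            = (((start + 1).toNat + (value ++ '"' :: part).length : Nat) : Int) by
          simp only [List.length_append, List.length_cons]; push_cast; omega]
      rw [show text.toList.length - ((start + 1).toNat + value.length + 1 + part.length)
            = ((PySem.Str.len text) - (((start + 1).toNat + (value ++ '"' :: part).length : Nat) : Int)).toNat by
          rw [PySem.Str.len_eq]
          simp only [List.length_append, List.length_cons]
          omega]
      rw [pqv_ofList_append]
      simpa using hIH
    · -- unescaped quote: both return here
      rw [if_pos (show pc ≠ '\\' from hbs), if_pos (show some pc ≠ some '\\' by simp [hbs])]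
      simp only [if_true, Option.getD]
      refine Prod.ext ?_ ?_
      · -- the returned chunk
        apply String.toList_inj.mp
        rw [PySem.Str.toList_slice, String.toList_ofList, PySem.Chars.slice_eq_listSlice,
          PySem.List.slice_toNat _ (by omega) (by omega),
          show ((((start + 1).toNat + value.length : Nat) : Int)).toNat - (start + 1).toNat
            = value.length by omega,
          hL']
        exact List.take_left' rfl
      · -- the returned index
        rw [PySem.Str.len_eq, String.toList_ofList]
        push_cast
        omega

theorem pqv_equal (text : String) (start : Int) (h : 0 ≤ start) :
    parse_quoted_value text start = parse_quoted_value_alt text start := by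
  have htl : (PySem.Str.slice text (some (start + 1)) none).toList
      = text.toList.drop (start + 1).toNat := by
    rw [PySem.Str.toList_slice, PySem.Chars.slice_eq_listSlice,
      PySem.List.slice_from _ (by omega)]
  have hsplit : PySem.Str.split? (PySem.Str.slice text (some (start + 1)) none) "\""
      = some (String.ofList (pqvSplitChar (text.toList.drop (start + 1).toNat)).1
          :: ((pqvSplitChar (text.toList.drop (start + 1).toNat)).2).map String.ofList) := by
    show Option.map _ (PySem.Chars.split?
        (PySem.Str.slice text (some (start + 1)) none).toList ("\"" : String).toList) = _
    rw [htl]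
    show Option.map _ (PySem.Chars.split? (text.toList.drop (start + 1).toNat) ['"']) = _
    rw [show PySem.Chars.split? (text.toList.drop (start + 1).toNat) ['"']
          = some (PySem.Chars.splitOn (text.toList.drop (start + 1).toNat) ['"']) from rfl,
      pqv_splitOn_eq]
    rfl
  have hJoin := pqvSplitChar_join (text.toList.drop (start + 1).toNat)
  have hnq2 := (pqvSplitChar_noquote (text.toList.drop (start + 1).toNat)).2
  have hnq1 := (pqvSplitChar_noquote (text.toList.drop (start + 1).toNat)).1
  have hg := pqv_glue_main text start h
    (pqvSplitChar (text.toList.drop (start + 1).toNat)).2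
    (pqvSplitChar (text.toList.drop (start + 1).toNat)).1 hJoin hnq2
  have halt : parse_quoted_value_alt text start
      = pqvGlueB text start (PySem.Str.slice text (some (start + 1)) none)
          (String.ofList (pqvSplitChar (text.toList.drop (start + 1).toNat)).1)
          (((pqvSplitChar (text.toList.drop (start + 1).toNat)).2).map String.ofList) := by
    show (match PySem.Str.split? (PySem.Str.slice text (some (start + 1)) none) "\"" with
      | some (value :: rest) =>
        pqvGlueB text start (PySem.Str.slice text (some (start + 1)) none) value rest
      | _ => (PySem.Str.strip (PySem.Str.slice text (some (start + 1)) none), PySem.Str.len text)) = _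
    rw [hsplit]
  rw [halt]
  show (pqvScanA text (start + 1) (start + 1) (PySem.Str.len text - (start + 1)).toNat).getD
      (pqvFallback text start) = _
  have hvlen := congrArg List.length hJoin
  simp only [List.length_drop, List.length_append] at hvlen
  by_cases hle : (start + 1).toNat ≤ text.toList.length
  · -- A first skips the quote-free part before the first delimiter
    set vl := (pqvSplitChar (List.drop (start + 1).toNat text.toList)).1.length with hvl
    have hskip := pqv_skip text (start + 1) vl (start + 1).toNat
      (text.toList.length - ((start + 1).toNat + vl))
      (by omega)
      (fun j hj1 hj2 =>
        pqv_noquote_seg text.toList []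
          (pqvSplitChar (text.toList.drop (start + 1).toNat)).1
          (((pqvSplitChar (text.toList.drop (start + 1).toNat)).2).flatMap (fun p => '"' :: p))
          (start + 1).toNat (by simpa using hJoin) hnq1 j
          (by simpa using hj1) (by simp only [List.length_nil, Nat.add_zero, ← hvl]; omega))
    rw [show (((start + 1).toNat : Nat) : Int) = start + 1 by omega] at hskip
    rw [show (PySem.Str.len text - (start + 1)).toNat
          = vl + (text.toList.length - ((start + 1).toNat + vl)) by
        rw [PySem.Str.len_eq]; omega]
    rw [hskip]
    rw [show (((start + 1).toNat + vl : Nat) : Int) = start + 1 + (vl : Int) by push_cast; omega] at hg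
    rw [show text.toList.length - ((start + 1).toNat + vl)
          = (PySem.Str.len text - (start + 1 + (vl : Int))).toNat by
        rw [PySem.Str.len_eq]; omega]
    exact hg
  · -- start + 1 is past the end: the tail is empty and A's loop runs zero times
    have hd : text.toList.drop (start + 1).toNat = [] := List.drop_eq_nil_of_le (by omega)
    rw [hd] at hg ⊢
    rw [show (((start + 1).toNat + (pqvSplitChar ([] : List Char)).1.length : Nat) : Int)
          = start + 1 by simp [pqvSplitChar]; omega] at hg
    exact hg

-- ===== VERDICT (by name: the statement is the Claim_ definition above) =====
theorem parse_quoted_value_spec : Claim_equal_parse_quoted_value := by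
  intro text start _ hpre
  exact pqv_equal text start hpre
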